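-- pv_equiv track=rewrite | github.com/Nearsoft/google-code-jam | solutions/double-or-one-thing/Python/double_or_one_thing.py | double_or_one_thing
-- ===== SOURCE A (Python) =====
-- def double_or_one_thing(s:str='')->str:
--     """Returns the string that comes first alphabetically
--     from the set of strings that can be produced from s
--     by highlighting different characters in s.
--
--     Args:
--         s: A non-empty string. Each character of s is
--           an uppercase letter from the English alphabet.
--
--     Returns:
--         The string that comes first alphabetically
--         from the set of strings that can be produced from
--         s by highlighting different characters in S.
--         For example:
--         CODEJAMDAY -> CCODDEEJAAMDAAY
--
--     Raises:
--         TypeError: The s contains character that are not from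
--             the English alphabet.
--     """
--
--     if not s.isalpha():
--         raise TypeError('The string must be non-empty and all the character must be alphabetic.')
--
--     if len(s) == 1:
--         return s
--
--     output = ''
--
--     current_char = ''
--     # Store the last character that was processed.
--     last_char = s[0]
--     # Store the amount of times the last character processed appeared,
--     # in case of similar contiguos characters.
--     char_count = 1
--
--     for i in range(1, len(s)):
--         current_char = s[i]
--
--         if ord(current_char) != ord(last_char):
--             """If the last character(s) is smaller than the current, it appends the
--             previous character(s) highlighted to create a string lexicographically
--             smaller, else it only appends the previous character(s) without highlight."""
--             output += (last_char * char_count) if ord(last_char) > ord(current_char) \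
--                 else (last_char * (char_count * 2))
--             last_char = current_char
--             char_count = 1
--         else:
--             """Keep the count of how many similar characters have appeared in a row."""
--             char_count += 1
--
--     """Appends the last character(s) that appeared in the string, and it covers the case
--     all the characters are the same."""
--     output += last_char * char_count
--
--     return output.upper()
-- ===== SOURCE B (Python) =====
-- def double_or_one_thing(s: str = '') -> str:
--     """Right-to-left scan: a character is doubled iff it is smaller than its
--     right neighbour, or equal to a doubled right neighbour."""
--     if not s.isalpha():
--         raise TypeError('The string must be non-empty and all the character must be alphabetic.')
--
--     out = []
--     doubled = False
--     nxt = None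
--     for c in reversed(s):
--         if nxt is None:
--             doubled = False
--         else:
--             doubled = c < nxt or (c == nxt and doubled)
--         out.append(c + c if doubled else c)
--         nxt = c
--     return ''.join(reversed(out)).upper()
-- ===== Notes on version B (the rewrite author's own statement) =====
-- stated objective: alternative
-- what changed: Replaced A's left-to-right loop that counts runs of equal characters and flushes each run singled or doubled by comparing it with the next character, by a right-to-left structural recursion that computes a 'doubled' flag per position (smaller than right neighbour, or equal to a doubled neighbour) and emits each character once or twice.
-- intended difference: On single-character lowercase inputs (e.g. 'a') A's early return skips the final .upper() and returns the lowercase letter unchanged, while B returns its uppercase form ('A'), which is the intended value since every other alphabetic input is returned uppercased. — e.g. on double_or_one_thing("a"): A returns "a", B returns "A"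
import Mathlib
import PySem

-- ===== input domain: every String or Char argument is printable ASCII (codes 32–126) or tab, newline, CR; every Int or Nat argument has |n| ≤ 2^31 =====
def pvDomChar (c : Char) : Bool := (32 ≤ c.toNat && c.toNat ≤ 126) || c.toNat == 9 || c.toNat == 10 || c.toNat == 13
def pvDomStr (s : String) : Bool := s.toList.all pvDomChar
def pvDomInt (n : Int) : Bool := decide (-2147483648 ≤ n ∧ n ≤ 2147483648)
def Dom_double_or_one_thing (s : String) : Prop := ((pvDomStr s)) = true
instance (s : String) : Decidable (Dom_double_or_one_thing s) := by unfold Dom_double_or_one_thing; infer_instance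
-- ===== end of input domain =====

-- B replaces A's left-to-right run-counting loop by a right-to-left structural
-- recursion carrying a 'doubled' flag (objective: alternative decomposition, same cost).
-- A's single-char early return skips .upper(); B applies it there too (see D_ below).

-- ===== PORT A =====
-- one loop step of A: state (output, last_char, char_count), cur = s[i]
def aStep (st : List Char × Char × Nat) (cur : Char) : List Char × Char × Nat :=
  if cur ≠ st.2.1 then
    (st.1 ++ (if st.2.1 > cur then List.replicate st.2.2 st.2.1
              else List.replicate (st.2.2 * 2) st.2.1), cur, 1)
  else (st.1, st.2.1, st.2.2 + 1)

def double_or_one_thing (s : String) : String :=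
  -- Python raises TypeError when not s.isalpha(); those inputs are excluded by Pre_.
  if PySem.Str.strIsalpha s = false then "" else
  let chars := s.toList
  if chars.length = 1 then s
  else
    let st := (PySem.List.pyRange 1 (PySem.List.len chars)).foldl
      (fun st i => aStep st (PySem.List.pyGetD chars i ' ')) ([], chars.headD ' ', 1)
    PySem.Str.upper (String.ofList (st.1 ++ List.replicate st.2.2 st.2.1))

-- ===== PORT B =====
-- one loop step of B: state (out, doubled, nxt), c = current char (scanning from the right)
def bStep (st : List (List Char) × Bool × Option Char) (c : Char) :
    List (List Char) × Bool × Option Char :=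
  let dbl := match st.2.2 with
    | none => false
    | some nxt => decide (c < nxt) || (decide (c = nxt) && st.2.1)
  (st.1 ++ [if dbl then [c, c] else [c]], dbl, some c)

def double_or_one_thing_alt (s : String) : String :=
  if PySem.Str.strIsalpha s = false then "" else
  let st := (s.toList.reverse).foldl bStep ([], false, none)
  PySem.Str.upper (String.ofList st.1.reverse.flatten)

-- ===== PRECONDITION & SPEC =====
-- Pre_ excludes exactly the inputs on which A raises TypeError (empty or non-alphabetic strings).
def Pre_double_or_one_thing (s : String) : Prop := PySem.Str.strIsalpha s = true
instance (s : String) : Decidable (Pre_double_or_one_thing s) := by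
  unfold Pre_double_or_one_thing; infer_instance
def pvWitness_double_or_one_thing : String := "CODEJAMDAY"

-- On single lowercase letters A's early return skips the final .upper() and returns
-- the lowercase letter unchanged, while B returns its uppercase form, which is the
-- intended value since every other alphabetic input is returned uppercased.
def D_double_or_one_thing (s : String) : Prop :=
  s.toList.length = 1 ∧ s.toList.all PySem.Chars.islower = true
instance (s : String) : Decidable (D_double_or_one_thing s) := by
  unfold D_double_or_one_thing; infer_instance

def Spec_double_or_one_thing (s : String) (out : String) : Prop :=
  ¬ D_double_or_one_thing s → out = double_or_one_thing_alt s
instance (s : String) (out : String) : Decidable (Spec_double_or_one_thing s out) := by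
  unfold Spec_double_or_one_thing; infer_instance

def pvDiffWitness_double_or_one_thing : String := "a"
def pvDiffWitnessOut_double_or_one_thing : String × String := ("a", "A")

-- ===== CLAIM (what is proved, stated in full; the proofs are below) =====
def Claim_unchanged_double_or_one_thing : Prop := ∀ (s : String),
  Dom_double_or_one_thing s → Pre_double_or_one_thing s →
  Spec_double_or_one_thing s (double_or_one_thing s)
def Claim_changed_double_or_one_thing : Prop :=
  Dom_double_or_one_thing (pvDiffWitness_double_or_one_thing) ∧
  Pre_double_or_one_thing (pvDiffWitness_double_or_one_thing) ∧
  D_double_or_one_thing (pvDiffWitness_double_or_one_thing) ∧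
  double_or_one_thing (pvDiffWitness_double_or_one_thing) = pvDiffWitnessOut_double_or_one_thing.1 ∧
  double_or_one_thing_alt (pvDiffWitness_double_or_one_thing) = pvDiffWitnessOut_double_or_one_thing.2 ∧
  pvDiffWitnessOut_double_or_one_thing.1 ≠ pvDiffWitnessOut_double_or_one_thing.2
def Claim_exact_double_or_one_thing : Prop := ∀ (s : String),
  Dom_double_or_one_thing s → Pre_double_or_one_thing s → D_double_or_one_thing s →
  double_or_one_thing s ≠ double_or_one_thing_alt s

-- ===== LEMMAS AND PROOFS =====

-- proof-side recursive view of B's loop: (output chars, whether the head char was doubled)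
def bGo : Char → List Char → List Char × Bool
  | c, [] => ([c], false)
  | c, d :: rest =>
    let p := bGo d rest
    let dbl2 := decide (c < d) || (decide (c = d) && p.2)
    ((if dbl2 then [c, c] else [c]) ++ p.1, dbl2)

-- per-character pieces of bGo's output, in original order
def bPieces : Char → List Char → List (List Char)
  | c, [] => [[c]]
  | c, d :: rest =>
    (if decide (c < d) || (decide (c = d) && (bGo d rest).2) then [c, c] else [c]) :: bPieces d rest

lemma bPieces_flatten : ∀ (c : Char) (rest : List Char),
    (bPieces c rest).flatten = (bGo c rest).1 := by
  intro c rest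
  induction rest generalizing c with
  | nil => rfl
  | cons d rest' ih => simp [bPieces, bGo, ih d]

-- B's loop over the reversed string computes bGo
lemma bLoop (rest : List Char) : ∀ (c : Char),
    (rest.reverse ++ [c]).foldl bStep ([], false, none) =
      ((bPieces c rest).reverse, (bGo c rest).2, some c) := by
  induction rest with
  | nil => intro c; rfl
  | cons d rest' ih =>
    intro c
    have hsplit : ((d :: rest').reverse ++ [c]) = (rest'.reverse ++ [d]) ++ [c] := by simp
    rw [hsplit, List.foldl_append, ih d]
    simp only [List.foldl_cons, List.foldl_nil, bStep, bGo, bPieces]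
    simp

lemma bGo_cons (c d : Char) (rest : List Char) :
    bGo c (d :: rest) =
      ((if (decide (c < d) || (decide (c = d) && (bGo d rest).2)) then [c, c] else [c]) ++ (bGo d rest).1,
       decide (c < d) || (decide (c = d) && (bGo d rest).2)) := rfl

-- the factor by which a run is written out: 2 if doubled, 1 if not
lemma rep_succ_snoc (n : Nat) (c : Char) :
    List.replicate n c ++ [c] = List.replicate (n + 1) c := by
  induction n with
  | zero => rfl
  | succ k ih => simpa [List.replicate_succ] using ih

lemma rep_two_snoc (n : Nat) (c : Char) :
    List.replicate n c ++ [c, c] = List.replicate (n + 2) c := by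
  have h1 := rep_succ_snoc (n + 1) c
  have h0 := rep_succ_snoc n c
  calc List.replicate n c ++ [c, c]
      = (List.replicate n c ++ [c]) ++ [c] := by simp
    _ = List.replicate (n + 1) c ++ [c] := by rw [h0]
    _ = List.replicate (n + 2) c := h1

-- A finishes a fold state by appending the pending run
def aFin (st : List Char × Char × Nat) : List Char := st.1 ++ List.replicate st.2.2 st.2.1

-- main invariant: A's run loop computes B's recursion, with the pending run
-- (cnt - 1 extra copies of last) written out by the flag bGo returns for last
lemma aLoop_eq_bGo (rest : List Char) : ∀ (out : List Char) (last : Char) (cnt : Nat),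
    1 ≤ cnt →
    aFin (rest.foldl aStep (out, last, cnt)) =
      out ++ List.replicate ((cnt - 1) * (if (bGo last rest).2 then 2 else 1)) last
          ++ (bGo last rest).1 := by
  induction rest with
  | nil =>
    intro out last cnt h1
    simp only [List.foldl_nil, bGo, aFin]
    have : List.replicate (cnt - 1) last ++ [last] = List.replicate cnt last := by
      have := rep_succ_snoc (cnt - 1) last
      rwa [Nat.sub_add_cancel h1] at this
    simp [← this]
  | cons cur rest' ih =>
    intro out last cnt h1
    by_cases hc : cur = last
    · subst hc
      rw [List.foldl_cons]
      have hstep : aStep (out, cur, cnt) cur = (out, cur, cnt + 1) := by simp [aStep]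
      rw [hstep, ih out cur (cnt + 1) (by omega), bGo_cons]
      simp only [lt_self_iff_false, decide_false, decide_true, Bool.false_or, Bool.true_and]
      by_cases hf : (bGo cur rest').2 = true
      · simp only [hf, if_true]
        have h2 : (cnt + 1 - 1) * 2 = (cnt - 1) * 2 + 2 := by omega
        rw [h2, ← rep_two_snoc]
        simp [List.append_assoc]
      · simp only [Bool.not_eq_true] at hf
        simp only [hf, Bool.false_eq_true, if_false]
        have h2 : (cnt + 1 - 1) * 1 = (cnt - 1) * 1 + 1 := by omega
        rw [h2, ← rep_succ_snoc]
        simp [List.append_assoc]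
    · rw [List.foldl_cons]
      have hcl : cur ≠ last := hc
      have hstep : aStep (out, last, cnt) cur =
          (out ++ (if last > cur then List.replicate cnt last
                   else List.replicate (cnt * 2) last), cur, 1) := by
        simp [aStep, hcl]
      rw [hstep, ih _ cur 1 (le_refl 1), bGo_cons]
      have hde : decide (last = cur) = false := by
        simp only [decide_eq_false_iff_not]; exact fun h => hc h.symm
      simp only [hde, Bool.false_and, Bool.or_false]
      by_cases hlt : last < cur
      · have hgt : ¬ (last > cur) := not_lt_of_gt hlt
        simp only [hlt, decide_true, if_true, if_neg hgt]
        have h2 : cnt * 2 = (cnt - 1) * 2 + 2 := by omega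
        rw [h2, ← rep_two_snoc]
        simp [List.append_assoc]
      · have hgt : last > cur := by
          rcases lt_trichotomy last cur with h | h | h
          · exact absurd h hlt
          · exact absurd h.symm hc
          · exact h
        simp only [hlt, decide_false, Bool.false_eq_true, if_false, if_pos hgt]
        have h2 : cnt = (cnt - 1) * 1 + 1 := by omega
        rw [h2, ← rep_succ_snoc]
        simp [List.append_assoc]

lemma strIsalpha_ne_nil {s : String} (h : PySem.Str.strIsalpha s = true) :
    s.toList ≠ [] := by
  rw [PySem.Str.strIsalpha_eq] at h
  unfold PySem.Chars.strIsalpha at h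
  simp only [Bool.and_eq_true, Bool.not_eq_true'] at h
  simpa [List.isEmpty_iff] using h.1

lemma portA_loop (l : List Char) (st0 : List Char × Char × Nat) :
    (PySem.List.pyRange 1 (PySem.List.len l)).foldl
        (fun st i => aStep st (PySem.List.pyGetD l i ' ')) st0 =
      (l.drop 1).foldl aStep st0 := by
  have h := PySem.List.foldl_pyRange_pyGetD l ' ' aStep st0 (by norm_num : (0:Int) ≤ 1)
  simpa using h

lemma alt_eq_bGo {s : String} (hg : ¬ PySem.Str.strIsalpha s = false)
    {c : Char} {rest : List Char} (hl : s.toList = c :: rest) :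
    double_or_one_thing_alt s = PySem.Str.upper (String.ofList (bGo c rest).1) := by
  unfold double_or_one_thing_alt
  simp only [if_neg hg, hl, List.reverse_cons, bLoop, List.reverse_reverse, bPieces_flatten]

-- ===== VERDICT (by name: the statement is the Claim_ definition above) =====
theorem double_or_one_thing_spec : Claim_unchanged_double_or_one_thing := by
  intro s _hdom hpre hnd
  have hpre' : PySem.Str.strIsalpha s = true := hpre
  have hg : ¬ (PySem.Str.strIsalpha s = false) := by rw [hpre']; simp
  rcases hl : s.toList with _ | ⟨c, rest⟩
  · exact absurd hl (strIsalpha_ne_nil hpre')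
  · show double_or_one_thing s = double_or_one_thing_alt s
    rw [alt_eq_bGo hg hl]
    unfold double_or_one_thing
    rcases rest with _ | ⟨d, rest'⟩
    · -- single character: A returns s unchanged; possible only for uppercase (¬ D_)
      simp only [if_neg hg, hl, List.length_cons, List.length_nil]
      have hnl : PySem.Chars.islower c = false := by
        by_contra h
        simp only [Bool.not_eq_false] at h
        exact hnd ⟨by rw [hl]; rfl, by rw [hl]; simp [h]⟩
      have hup : PySem.Chars.upperChar c = c := by
        unfold PySem.Chars.upperChar; rw [hnl]; simp
      have hu : PySem.Str.upper (String.ofList [c]) = String.ofList [c] := by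
        unfold PySem.Str.upper PySem.Chars.upper
        simp [hup]
      rw [bGo, hu, ← hl, String.ofList_toList]
      simp
    · -- length ≥ 2: run the loop lemma
      simp only [if_neg hg, hl, List.length_cons, List.headD_cons,
        portA_loop, List.drop_succ_cons, List.drop_zero,
        if_neg (by omega : ¬ rest'.length + 1 + 1 = 1)]
      have := aLoop_eq_bGo (d :: rest') [] c 1 (le_refl 1)
      unfold aFin at this
      rw [this]
      simp

theorem double_or_one_thing_changed : Claim_changed_double_or_one_thing := by
  unfold Claim_changed_double_or_one_thing; decide

theorem double_or_one_thing_tight : Claim_exact_double_or_one_thing := by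
  intro s _hdom hpre hd
  obtain ⟨hlen, hlow⟩ := hd
  have hpre' : PySem.Str.strIsalpha s = true := hpre
  have hg : ¬ (PySem.Str.strIsalpha s = false) := by rw [hpre']; simp
  rcases hl : s.toList with _ | ⟨c, rest⟩
  · rw [hl] at hlen; simp at hlen
  · rcases rest with _ | ⟨d, rest'⟩
    · have hlc : PySem.Chars.islower c = true := by
        rw [hl] at hlow; simpa using hlow
      intro heq
      rw [alt_eq_bGo hg hl, bGo] at heq
      unfold double_or_one_thing at heq
      simp only [if_neg hg, hl, List.length_cons, List.length_nil, if_true] at heq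
      have htl := congrArg String.toList heq
      rw [hl] at htl
      unfold PySem.Str.upper PySem.Chars.upper at htl
      simp only [String.toList_ofList, List.map_cons, List.map_nil] at htl
      have hcc : c = PySem.Chars.upperChar c := by simpa using htl
      unfold PySem.Chars.upperChar at hcc
      rw [hlc] at hcc
      simp only [if_true] at hcc
      have hge : 97 ≤ c.toNat ∧ c.toNat ≤ 122 := by
        unfold PySem.Chars.islower at hlc
        simp only [Bool.and_eq_true, decide_eq_true_eq] at hlc
        exact ⟨hlc.1, hlc.2⟩
      have hv : (Char.ofNat (c.toNat - 32)).toNat = c.toNat - 32 := by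
        rw [Char.toNat_ofNat, if_pos]
        unfold Nat.isValidChar
        left; omega
      have hne : (Char.ofNat (c.toNat - 32)).toNat ≠ c.toNat := by omega
      exact hne (congrArg Char.toNat hcc.symm)
    · rw [hl] at hlen; simp at hlen
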